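-- pv_equiv track=rewrite | github.com/dpausp/PirateTools42 | piratetools42/markdownpad.py | detect_indentation
-- ===== SOURCE A (Python) =====
-- def detect_indentation(symbol, line):
--     level = 0
--     pos = 1
--     for c in line[1:]:
--         if c == "*":
--             level += 1
--         elif c == " ":
--             pass
--         else:
--             break
--         pos += 1
--     return level, pos
-- ===== SOURCE B (Python) =====
-- def detect_indentation(symbol, line):
--     rest = line[1:]
--     stripped = rest.lstrip("* ")
--     pos = 1 + len(rest) - len(stripped)
--     return rest[:pos - 1].count("*"), pos
-- ===== Notes on version B (the rewrite author's own statement) =====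
-- stated objective: idiomatic
-- what changed: B has no loop at all: it computes the boundary position by subtracting the length of rest.lstrip('* ') from len(rest), then counts '*' in the slice up to that boundary, instead of A's interleaved loop with two mutable counters and an early break.
import Mathlib
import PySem

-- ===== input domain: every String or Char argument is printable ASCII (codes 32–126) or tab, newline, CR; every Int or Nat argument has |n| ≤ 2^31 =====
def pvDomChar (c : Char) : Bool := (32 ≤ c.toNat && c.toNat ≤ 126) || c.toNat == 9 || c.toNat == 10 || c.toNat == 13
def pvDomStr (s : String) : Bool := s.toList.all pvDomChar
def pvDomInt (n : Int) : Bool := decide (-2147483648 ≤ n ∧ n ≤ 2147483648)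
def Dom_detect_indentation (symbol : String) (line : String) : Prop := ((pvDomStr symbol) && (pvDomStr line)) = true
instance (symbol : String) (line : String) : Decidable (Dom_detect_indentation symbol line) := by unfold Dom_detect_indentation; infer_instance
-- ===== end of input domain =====

-- B is loop-free: it derives the boundary position from the length of rest.lstrip("* ") and counts
-- '*' in the slice before it, instead of A's loop with two mutable counters and an early break.

-- ===== PORT A =====
-- A's for-loop over line[1:] with mutable level/pos and break, as structural recursion on the list.
def aLoop : List Char → Int → Int → Int × Int
  | [], level, pos => (level, pos)
  | c :: rest, level, pos =>
    if c = '*' then aLoop rest (level + 1) (pos + 1)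
    else if c = ' ' then aLoop rest level (pos + 1)
    else (level, pos)

def detect_indentation (_symbol : String) (line : String) : Int × Int :=
  -- line[1:] on a string is exactly dropping the first character
  aLoop (line.toList.drop 1) 0 1

-- ===== PORT B =====
def detect_indentation_alt (_symbol : String) (line : String) : Int × Int :=
  let rest := line.toList.drop 1                                   -- rest = line[1:]
  let stripped := rest.dropWhile (fun c => c = '*' || c = ' ')     -- rest.lstrip("* "): drop leading chars of the set (exact)
  let pos : Int := 1 + (rest.length : Int) - (stripped.length : Int)
  (PySem.List.count (PySem.List.slice rest none (some (pos - 1))) '*', pos)   -- rest[:pos-1].count("*")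

-- ===== PRECONDITION & SPEC =====
def Spec_detect_indentation (symbol : String) (line : String) (out : Int × Int) : Prop := out = detect_indentation_alt symbol line
instance (symbol : String) (line : String) (out : Int × Int) : Decidable (Spec_detect_indentation symbol line out) := by unfold Spec_detect_indentation; infer_instance

-- ===== CLAIM (what is proved, stated in full; the proofs are below) =====
def Claim_equal_detect_indentation : Prop := ∀ (symbol : String) (line : String), Dom_detect_indentation symbol line → Spec_detect_indentation symbol line (detect_indentation symbol line)

-- ===== LEMMAS AND PROOFS =====
theorem aLoop_eq (l : List Char) : ∀ (level pos : Int),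
    aLoop l level pos =
      (level + PySem.List.count (l.takeWhile (fun c => c = '*' || c = ' ')) '*',
       pos + ((l.takeWhile (fun c => c = '*' || c = ' ')).length : Int)) := by
  induction l with
  | nil => intro level pos; simp [aLoop]
  | cons c rest ih =>
    intro level pos
    by_cases h1 : c = '*'
    · simp [aLoop, h1, ih, PySem.List.count]
      omega
    · by_cases h2 : c = ' '
      · simp [aLoop, h2, ih, PySem.List.count]
        omega
      · simp [aLoop, h1, h2]

theorem take_length_takeWhile (p : Char → Bool) (l : List Char) :
    l.take (l.takeWhile p).length = l.takeWhile p := by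
  induction l with
  | nil => simp
  | cons c rest ih =>
    by_cases h : p c <;> simp [h, ih]

theorem length_takeWhile_add_dropWhile (p : Char → Bool) (l : List Char) :
    (l.takeWhile p).length + (l.dropWhile p).length = l.length := by
  conv_rhs => rw [← List.takeWhile_append_dropWhile (p := p) (l := l)]
  rw [List.length_append]

-- ===== VERDICT (by name: the statement is the Claim_ definition above) =====
theorem detect_indentation_spec : Claim_equal_detect_indentation := by
  intro symbol line _
  unfold Spec_detect_indentation detect_indentation detect_indentation_alt
  rw [aLoop_eq]
  set l := line.toList.drop 1 with hl
  set p : Char → Bool := fun c => c = '*' || c = ' ' with hp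
  have hlen := length_takeWhile_add_dropWhile p l
  have hpos : (1 : Int) + (l.length : Int) - ((l.dropWhile p).length : Int) - 1
      = ((l.takeWhile p).length : Int) := by omega
  have hslice : PySem.List.slice l none
      (some ((1 : Int) + (l.length : Int) - ((l.dropWhile p).length : Int) - 1))
      = l.takeWhile p := by
    rw [hpos, PySem.List.slice_to l (Int.natCast_nonneg _)]
    simpa using take_length_takeWhile p l
  simp only [hslice]
  rw [Prod.mk.injEq]
  exact ⟨by omega, by omega⟩
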